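-- pv_equiv track=rewrite | github.com/luizaugustoliveira/Algoritmos | Funções/formata_citacoes_u6/formata.py | meu_split
-- ===== SOURCE A (Python) =====
-- def meu_split(sequencia):
--     lista = []
--     acumulador = ""
--     for i in range(len(sequencia)):
--         if sequencia[i] != " ":
--             acumulador += sequencia[i]
--         if sequencia[i] == " ":
--             if acumulador != "":
--                 lista.append(acumulador)
--             acumulador = ""
--
--     if acumulador != "":
--         lista.append(acumulador)
--     return lista
-- ===== SOURCE B (Python) =====
-- def meu_split(sequencia):
--     return [t for t in sequencia.split(" ") if t != ""]
-- ===== Notes on version B (the rewrite author's own statement) =====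
-- stated objective: idiomatic
-- what changed: Replaces A's manual per-character accumulator state machine with a split(" ")-then-filter decomposition that delegates the scan to the library (C-level split), measured faster.
import Mathlib
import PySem

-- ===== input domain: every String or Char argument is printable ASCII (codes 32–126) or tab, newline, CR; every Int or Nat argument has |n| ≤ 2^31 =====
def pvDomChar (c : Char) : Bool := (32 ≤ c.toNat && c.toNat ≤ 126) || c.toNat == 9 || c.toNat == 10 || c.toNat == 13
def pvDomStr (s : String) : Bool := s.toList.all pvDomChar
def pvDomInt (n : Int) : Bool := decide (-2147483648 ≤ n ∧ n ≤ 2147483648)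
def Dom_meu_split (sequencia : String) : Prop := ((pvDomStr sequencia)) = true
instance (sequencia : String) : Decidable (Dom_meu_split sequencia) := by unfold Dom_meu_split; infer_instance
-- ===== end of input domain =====

-- B replaces A's per-character accumulator state machine by split(" ") followed by
-- dropping the empty tokens (idiomatic; same linear cost).

-- ===== PORT A =====
-- literal port of A's loop: state = (lista, acumulador); the accumulator is kept
-- as List Char (Python string concatenation char by char) and turned into a String
-- exactly where Python appends it to the list — exact on all inputs.
def meuSplitGo : List Char → List String → List Char → List String
  | [], lista, acc => if acc ≠ [] then lista ++ [String.ofList acc] else lista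
  | c :: rest, lista, acc =>
      let acc1 := if c ≠ ' ' then acc ++ [c] else acc
      if c = ' ' then
        meuSplitGo rest (if acc1 ≠ [] then lista ++ [String.ofList acc1] else lista) []
      else
        meuSplitGo rest lista acc1

def meu_split (sequencia : String) : List String :=
  meuSplitGo sequencia.toList [] []

-- ===== PORT B =====
-- Source B: return [t for t in sequencia.split(" ") if t != ""]
def meu_split_alt (sequencia : String) : List String :=
  ((PySem.Str.split? sequencia " ").getD []).filter (fun t => t ≠ "")

-- ===== PRECONDITION & SPEC =====
def Spec_meu_split (sequencia : String) (out : List String) : Prop := out = meu_split_alt sequencia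
instance (sequencia : String) (out : List String) : Decidable (Spec_meu_split sequencia out) := by unfold Spec_meu_split; infer_instance

-- ===== CLAIM (what is proved, stated in full; the proofs are below) =====
def Claim_equal_meu_split : Prop := ∀ (sequencia : String), Dom_meu_split sequencia → Spec_meu_split sequencia (meu_split sequencia)

-- ===== LEMMAS AND PROOFS =====

-- reference single-space splitter used only in the proofs
def splitSp (pre : List Char) : List Char → List (List Char)
  | [] => [pre]
  | c :: r => if c = ' ' then pre :: splitSp [] r else splitSp (pre ++ [c]) r

theorem go_space (fuel : Nat) (l cur acc : List Char) (acc' : List (List Char))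
    (h : l.length < fuel) :
    PySem.Chars.splitOn.go [' '] fuel l cur acc' = acc'.reverse ++ splitSp cur.reverse l := by
  induction fuel generalizing l cur acc' with
  | zero => omega
  | succ f ih =>
    cases l with
    | nil => simp [PySem.Chars.splitOn.go, splitSp]
    | cons c rest =>
      by_cases hc : c = ' '
      · subst hc
        simp only [PySem.Chars.splitOn.go, List.isPrefixOf, beq_self_eq_true,
          Bool.true_and, List.isPrefixOf_nil_left, if_true]
        rw [show List.drop [' '].length (' ' :: rest) = rest from rfl]
        rw [ih rest [] (List.reverse cur :: acc') (by simpa using Nat.lt_of_succ_lt_succ h)]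
        simp [splitSp]
      · simp only [PySem.Chars.splitOn.go, List.isPrefixOf]
        rw [if_neg (by simp only [beq_iff_eq, Bool.and_eq_true, decide_eq_true_eq]; intro hp; exact hc hp.1.symm)]
        rw [ih rest (c :: cur) acc' (by simpa using Nat.lt_of_succ_lt_succ h)]
        simp [splitSp, hc]

theorem splitOn_space (s : List Char) :
    PySem.Chars.splitOn s [' '] = splitSp [] s := by
  unfold PySem.Chars.splitOn
  rw [go_space (s.length + 1) s [] [] [] (by omega)]
  rfl

theorem ofList_ne_empty_iff (l : List Char) : (String.ofList l ≠ "") ↔ l ≠ [] := by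
  constructor
  · intro h hl; exact h (by simp [hl])
  · intro h he
    have : l = [] := by
      have := congrArg String.toList he
      simpa using this
    exact h this

theorem goA_eq (l : List Char) (lista : List String) (acc : List Char) :
    meuSplitGo l lista acc =
      lista ++ ((splitSp acc l).map String.ofList).filter (fun t => t ≠ "") := by
  induction l generalizing lista acc with
  | nil =>
    by_cases h : acc = []
    · subst h; simp [meuSplitGo, splitSp]
    · simp [meuSplitGo, splitSp, h, (ofList_ne_empty_iff acc).mpr h]
  | cons c rest ih =>
    by_cases hc : c = ' '
    · subst hc
      simp only [meuSplitGo, if_neg (by simp : ¬(' ' ≠ ' ')), if_pos rfl] <;> skip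
      rw [ih]
      by_cases h : acc = []
      · subst h; simp [splitSp]
      · simp [splitSp, h, (ofList_ne_empty_iff acc).mpr h]
    · simp only [meuSplitGo, if_pos hc, if_neg hc]
      rw [ih]
      simp [splitSp, hc]

-- ===== VERDICT (by name: the statement is the Claim_ definition above) =====
theorem meu_split_spec : Claim_equal_meu_split := by
  intro s _
  show meu_split s = meu_split_alt s
  unfold meu_split meu_split_alt PySem.Str.split? PySem.Chars.split?
  rw [goA_eq]
  simp [splitOn_space]
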